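-- pv_equiv track=rewrite | github.com/zshcatsandevops/AI-Dumps-1.0 | cat'slunarmagic1.1beta.py | _make_demo_tiles
-- ===== SOURCE A (Python) =====
-- from typing import List, Tuple, Optional
--
-- def _make_demo_tiles(n: int) -> List[List[List[int]]]:
--     tiles = []
--     for t in range(n):
--         tile = [[0]*8 for _ in range(8)]
--         for y in range(8):
--             for x in range(8):
--                 # fun pattern: index depends on tile id and coords
--                 tile[y][x] = ((x^y) + (t%16)) & 0x0F
--         tiles.append(tile)
--     return tiles
-- ===== SOURCE B (Python) =====
-- from typing import List
--
-- def _make_demo_tiles(n: int) -> List[List[List[int]]]: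
--     base = [[x ^ y for x in range(8)] for y in range(8)]
--     templates = [[[(c + r) & 0x0F for c in row] for row in base] for r in range(16)]
--     return [[row[:] for row in templates[t % 16]] for t in range(n)]
-- ===== Notes on version B (the rewrite author's own statement) =====
-- stated objective: faster
-- what changed: B precomputes the base x^y grid and one template tile per residue class of the tile index once, then builds the output by copying the template selected by the tile index's residue, instead of A's recompute-every-cell triple loop per tile.
import Mathlib
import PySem

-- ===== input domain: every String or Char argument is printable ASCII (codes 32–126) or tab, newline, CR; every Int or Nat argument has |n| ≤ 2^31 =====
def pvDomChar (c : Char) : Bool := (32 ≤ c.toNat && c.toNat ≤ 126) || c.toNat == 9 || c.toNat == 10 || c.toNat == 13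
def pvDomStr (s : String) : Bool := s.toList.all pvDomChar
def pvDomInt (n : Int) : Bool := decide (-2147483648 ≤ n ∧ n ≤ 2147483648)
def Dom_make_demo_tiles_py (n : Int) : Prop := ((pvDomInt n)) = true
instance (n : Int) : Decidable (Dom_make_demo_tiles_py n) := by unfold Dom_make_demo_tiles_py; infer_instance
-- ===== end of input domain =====

-- B precomputes the 16 residue-template tiles once and copies template[t % 16] per output tile (faster in a timing run's constant-factor measurement).
-- ===== PORT A =====
-- for t in range(n): build an 8x8 tile cell by cell, tile[y][x] = ((x^y)+(t%16)) & 0x0F, append it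
def make_demo_tiles_py (n : Int) : List (List (List Int)) :=
  (PySem.List.pyRange 0 n 1).foldl (fun tiles t =>
    tiles ++ [(PySem.List.pyRange 0 8 1).map (fun y =>
      (PySem.List.pyRange 0 8 1).map (fun x =>
        PySem.Int.band (PySem.Int.bxor x y + PySem.Int.mod t 16) 0x0F))]) []

-- ===== PORT B =====
def make_demo_tiles_py_alt (n : Int) : List (List (List Int)) :=
  let base := (PySem.List.pyRange 0 8 1).map (fun y =>
    (PySem.List.pyRange 0 8 1).map (fun x => PySem.Int.bxor x y))
  let templates := (PySem.List.pyRange 0 16 1).map (fun r =>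
    base.map (fun row => row.map (fun c => PySem.Int.band (c + r) 0x0F)))
  -- row[:] copies are identity on values
  (PySem.List.pyRange 0 n 1).map (fun t =>
    (templates.getD (PySem.Int.mod t 16).toNat []).map (fun row => row))

-- ===== PRECONDITION & SPEC =====
def Spec_make_demo_tiles_py (n : Int) (out : List (List (List Int))) : Prop := out = make_demo_tiles_py_alt n
instance (n : Int) (out : List (List (List Int))) : Decidable (Spec_make_demo_tiles_py n out) := by unfold Spec_make_demo_tiles_py; infer_instance

-- ===== CLAIM (what is proved, stated in full; the proofs are below) =====
def Claim_equal_make_demo_tiles_py : Prop := ∀ (n : Int), Dom_make_demo_tiles_py n → Spec_make_demo_tiles_py n (make_demo_tiles_py n)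

-- ===== LEMMAS AND PROOFS =====

-- ===== VERDICT (by name: the statement is the Claim_ definition above) =====
-- the single tile A builds for loop index t equals B's template lookup, for every Int t
theorem tile_eq (t : Int) :
    (PySem.List.pyRange 0 8 1).map (fun y =>
      (PySem.List.pyRange 0 8 1).map (fun x =>
        PySem.Int.band (PySem.Int.bxor x y + PySem.Int.mod t 16) 0x0F)) =
    ((((PySem.List.pyRange 0 16 1).map (fun r =>
        ((PySem.List.pyRange 0 8 1).map (fun y =>
          (PySem.List.pyRange 0 8 1).map (fun x => PySem.Int.bxor x y))).map
          (fun row => row.map (fun c => PySem.Int.band (c + r) 0x0F)))).getD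
        (PySem.Int.mod t 16).toNat []).map (fun row => row)) := by
  have h0 : 0 ≤ PySem.Int.mod t 16 := PySem.Int.mod_nonneg t (by norm_num)
  have h1 : PySem.Int.mod t 16 < 16 := PySem.Int.mod_lt t (by norm_num)
  set r := PySem.Int.mod t 16 with hr
  interval_cases r <;> decide

theorem make_demo_tiles_py_spec : Claim_equal_make_demo_tiles_py := by
  intro n _
  unfold Spec_make_demo_tiles_py make_demo_tiles_py make_demo_tiles_py_alt
  rw [PySem.List.foldl_append_singleton_eq_map, List.nil_append]
  exact List.map_congr_left (fun t _ => tile_eq t)
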